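-- pv_equiv track=rewrite | github.com/bonbonnie/ToOffer | 16和为S的两个数字.py | FindNumbersWithSum1
-- ===== SOURCE A (Python) =====
-- def FindNumbersWithSum1(array, tsum):
--     memorys = {}
--     ret = []
--     for num in array:
--         if tsum - num in memorys:
--             if ret == []:
--                 ret = [tsum - num, num]
--             elif ret and ret[0] * ret[1] > (tsum - num) * num:
--                 ret = [tsum - num, num]
--         else:
--             memorys[num] = 1
--     return ret
-- ===== SOURCE B (Python) =====
-- def FindNumbersWithSum1(array, tsum):
--     cands = [j for j in range(len(array)) if tsum - array[j] in array[:j]]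
--     if not cands:
--         return []
--     j = min(cands, key=lambda j: (tsum - array[j]) * array[j])
--     return [tsum - array[j], array[j]]
-- ===== Notes on version B (the rewrite author's own statement) =====
-- stated objective: alternative
-- what changed: Replaced A's single pass with a seen-dict and a running best pair by two staged passes: a comprehension collecting every index whose complement occurs in the preceding slice, then min() with a product key selecting the answer (no accumulator, no seen structure).
import Mathlib
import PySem

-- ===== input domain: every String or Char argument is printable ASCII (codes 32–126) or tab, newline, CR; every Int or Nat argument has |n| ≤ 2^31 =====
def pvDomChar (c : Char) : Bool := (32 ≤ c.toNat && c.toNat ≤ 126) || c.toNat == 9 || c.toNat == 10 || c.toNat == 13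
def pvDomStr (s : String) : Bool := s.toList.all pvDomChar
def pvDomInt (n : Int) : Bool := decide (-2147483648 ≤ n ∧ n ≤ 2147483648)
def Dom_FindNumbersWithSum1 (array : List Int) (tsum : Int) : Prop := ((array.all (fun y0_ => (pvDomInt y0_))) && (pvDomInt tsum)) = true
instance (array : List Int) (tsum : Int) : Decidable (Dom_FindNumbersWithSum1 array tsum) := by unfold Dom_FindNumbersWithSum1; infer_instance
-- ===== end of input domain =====

-- B replaces A's one-pass seen-dict + running-best accumulator by two staged passes
-- (comprehension of candidate indices over prefix slices, then min() by product key);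
-- alternative decomposition, not faster.


-- ===== PORT A =====
-- one iteration of A's loop; state = (memorys, ret)
def pvStepA (tsum : Int) (st : PySem.Dict Int Int × List Int) (num : Int) :
    PySem.Dict Int Int × List Int :=
  if st.1.contains (tsum - num) then
    if st.2 = [] then (st.1, [tsum - num, num])
    else if st.2 ≠ [] ∧ PySem.List.pyGetD st.2 0 0 * PySem.List.pyGetD st.2 1 0 > (tsum - num) * num then
      (st.1, [tsum - num, num])
    else (st.1, st.2)
  else (st.1.insert num 1, st.2)

def FindNumbersWithSum1 (array : List Int) (tsum : Int) : List Int :=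
  (array.foldl (pvStepA tsum) (PySem.Dict.empty, [])).2

-- ===== PORT B =====
-- cands = [j for j in range(len(array)) if tsum - array[j] in array[:j]]; then min by product key
def FindNumbersWithSum1_alt (array : List Int) (tsum : Int) : List Int :=
  let cands := (PySem.List.pyRange 0 (array.length : Int) 1).filter
    (fun j => (PySem.List.slice array (some 0) (some j)).contains (tsum - PySem.List.pyGetD array j 0))
  if cands = [] then []
  else
    match PySem.List.min? cands
        (fun j => (tsum - PySem.List.pyGetD array j 0) * PySem.List.pyGetD array j 0) with
    | none => []   -- unreachable: cands ≠ []
    | some j => [tsum - PySem.List.pyGetD array j 0, PySem.List.pyGetD array j 0]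

-- ===== PRECONDITION & SPEC =====
def Spec_FindNumbersWithSum1 (array : List Int) (tsum : Int) (out : List Int) : Prop := out = FindNumbersWithSum1_alt array tsum
instance (array : List Int) (tsum : Int) (out : List Int) : Decidable (Spec_FindNumbersWithSum1 array tsum out) := by unfold Spec_FindNumbersWithSum1; infer_instance

-- ===== CLAIM (what is proved, stated in full; the proofs are below) =====
def Claim_equal_FindNumbersWithSum1 : Prop := ∀ (array : List Int) (tsum : Int), Dom_FindNumbersWithSum1 array tsum → Spec_FindNumbersWithSum1 array tsum (FindNumbersWithSum1 array tsum)

-- ===== LEMMAS AND PROOFS =====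

def pvProd (ret : List Int) : Int := PySem.List.pyGetD ret 0 0 * PySem.List.pyGetD ret 1 0

lemma pvProd_pair (a b : Int) : pvProd [a, b] = a * b := by
  simp [pvProd, PySem.List.pyGetD, PySem.List.pyGet?, PySem.List.pyIdx?]

-- proof-side model of A's inner update once a complement is found
def pvUpd (tsum num : Int) (ret : List Int) : List Int :=
  if ret = [] ∨ pvProd ret > (tsum - num) * num then [tsum - num, num] else ret

lemma pvUpd_ne_nil (tsum num : Int) (ret : List Int) :
    pvUpd tsum num ret = ret ∨ pvUpd tsum num ret = [tsum - num, num] := by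
  unfold pvUpd; split_ifs <;> simp

lemma pvUpd_ne_nil' (tsum num : Int) (ret : List Int) (h : ret ≠ []) :
    pvUpd tsum num ret ≠ [] := by
  unfold pvUpd; split_ifs <;> simp [h]

lemma pvUpd_prod_le (tsum num : Int) (ret : List Int) :
    pvProd (pvUpd tsum num ret) ≤ (tsum - num) * num := by
  unfold pvUpd
  split_ifs with h
  · rw [pvProd_pair]
  · rw [not_or] at h
    exact not_lt.mp h.2

lemma pvUpd_prod_mono (tsum num : Int) (ret : List Int) (hne : ret ≠ []) :
    pvProd (pvUpd tsum num ret) ≤ pvProd ret := by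
  unfold pvUpd
  split_ifs with h
  · rcases h with h | h
    · exact absurd h hne
    · rw [pvProd_pair]; exact le_of_lt h
  · exact le_refl _

-- proof-side model of a "seen-prefix" sweep: state = (seen, ret); on each num the current
-- ret is updated iff the complement lies in seen (skipped when an earlier pair beats it)
def pvStepS (tsum : Int) (st : List Int × List Int) (num : Int) : List Int × List Int :=
  (st.1 ++ [num],
   if (tsum - num) ∈ st.1 then pvUpd tsum num st.2 else st.2)

-- invariant tying A's dict to the seen prefix: every key of memorys has been seen, and
-- every seen value missing from memorys already produced a pair bounding ret's product
def pvInv (tsum : Int) (seen : List Int) (mem : PySem.Dict Int Int) (ret : List Int) : Prop :=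
  (∀ v, mem.contains v = true → v ∈ seen) ∧
  (∀ v ∈ seen, mem.contains v = true ∨ (ret ≠ [] ∧ pvProd ret ≤ v * (tsum - v)))

lemma pv_main (tsum : Int) :
    ∀ (rest seen : List Int) (mem : PySem.Dict Int Int) (ret : List Int),
      pvInv tsum seen mem ret →
      (rest.foldl (pvStepA tsum) (mem, ret)).2 = (rest.foldl (pvStepS tsum) (seen, ret)).2 := by
  intro rest
  induction rest with
  | nil => intro seen mem ret _; rfl
  | cons num t ih =>
      intro seen mem ret hinv
      obtain ⟨h1, h2⟩ := hinv
      rw [List.foldl_cons, List.foldl_cons]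
      by_cases hc : mem.contains (tsum - num) = true
      · -- A fires; the complement is in seen, so the sweep applies pvUpd too
        have hmem : (tsum - num) ∈ seen := h1 _ hc
        have hA : pvStepA tsum (mem, ret) num = (mem, pvUpd tsum num ret) := by
          unfold pvStepA pvUpd pvProd
          rw [if_pos hc]
          split_ifs <;> first | rfl | (exfalso; tauto)
        have hS : pvStepS tsum (seen, ret) num = (seen ++ [num], pvUpd tsum num ret) := by
          unfold pvStepS
          rw [if_pos hmem]
        rw [hA, hS]
        apply ih
        constructor
        · intro v hv; exact List.mem_append_left _ (h1 v hv)
        · intro v hv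
          rcases List.mem_append.mp hv with hv | hv
          · rcases h2 v hv with h | ⟨hne, hle⟩
            · exact Or.inl h
            · exact Or.inr ⟨pvUpd_ne_nil' tsum num ret hne,
                le_trans (pvUpd_prod_mono tsum num ret hne) hle⟩
          · have hv' : v = num := by simpa using hv
            rw [hv']
            refine Or.inr ⟨?_, ?_⟩
            · rcases pvUpd_ne_nil tsum num ret with h | h
              · rw [h]
                by_cases h0 : ret = []
                · unfold pvUpd at h; rw [if_pos (Or.inl h0)] at h; simp [← h]
                · exact h0
              · rw [h]; simp
            · calc pvProd (pvUpd tsum num ret) ≤ (tsum - num) * num := pvUpd_prod_le tsum num ret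
                _ = num * (tsum - num) := by ring
      · -- A inserts; if the complement is nonetheless in seen, pvUpd is a no-op (already beaten)
        have hA : pvStepA tsum (mem, ret) num = (mem.insert num 1, ret) := by
          unfold pvStepA
          simp [hc]
        have hS : pvStepS tsum (seen, ret) num = (seen ++ [num], ret) := by
          unfold pvStepS
          by_cases hm : (tsum - num) ∈ seen
          · rw [if_pos hm]
            rcases h2 _ hm with h | ⟨hne, hle⟩
            · exact absurd h (by simpa using hc)
            · have hle' : pvProd ret ≤ (tsum - num) * num := by
                calc pvProd ret ≤ (tsum - num) * (tsum - (tsum - num)) := hle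
                  _ = (tsum - num) * num := by ring
              unfold pvUpd
              rw [if_neg]
              rintro (h | h)
              · exact hne h
              · exact absurd hle' (not_le.mpr h)
          · rw [if_neg hm]
        rw [hA, hS]
        apply ih
        constructor
        · intro v hv
          rw [PySem.Dict.contains_insert] at hv
          rcases Bool.or_eq_true_iff.mp hv with h | h
          · exact List.mem_append_right _ (by simp [eq_of_beq h])
          · exact List.mem_append_left _ (h1 v h)
        · intro v hv
          rcases List.mem_append.mp hv with hv | hv
          · rcases h2 v hv with h | h
            · exact Or.inl (by rw [PySem.Dict.contains_insert, h, Bool.or_true])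
            · exact Or.inr h
          · have hv' : v = num := by simpa using hv
            rw [hv']
            exact Or.inl (by rw [PySem.Dict.contains_insert]; simp)

-- the candidate values (currents a_j whose complement occurs earlier), in pass order
def pvCvals (tsum : Int) : List Int → List Int → List Int
  | _, [] => []
  | seen, num :: t =>
      (if (tsum - num) ∈ seen then [num] else []) ++ pvCvals tsum (seen ++ [num]) t

lemma pvSweep_eq_cvals (tsum : Int) :
    ∀ (rest seen ret : List Int),
      (rest.foldl (pvStepS tsum) (seen, ret)).2 =
      (pvCvals tsum seen rest).foldl (fun r num => pvUpd tsum num r) ret := by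
  intro rest
  induction rest with
  | nil => intro seen ret; rfl
  | cons num t ih =>
      intro seen ret
      rw [List.foldl_cons]
      unfold pvStepS pvCvals
      by_cases hm : (tsum - num) ∈ seen
      · simp only [if_pos hm, List.singleton_append, List.foldl_cons]
        exact ih (seen ++ [num]) (pvUpd tsum num ret)
      · simp only [if_neg hm, List.nil_append]
        exact ih (seen ++ [num]) ret

-- representation of the running minimum as A keeps it
def pvRepr (tsum : Int) : Option Int → List Int
  | none => []
  | some m => [tsum - m, m]

def pvMinStep (tsum : Int) (acc : Option Int) (num : Int) : Option Int :=
  match acc with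
  | none => some num
  | some m => if (tsum - num) * num < (tsum - m) * m then some num else some m

lemma pvFold_upd_repr (tsum : Int) (vs : List Int) :
    ∀ acc, vs.foldl (fun r num => pvUpd tsum num r) (pvRepr tsum acc) =
      pvRepr tsum (vs.foldl (pvMinStep tsum) acc) := by
  induction vs with
  | nil => intro acc; rfl
  | cons num t ih =>
      intro acc
      rw [List.foldl_cons, List.foldl_cons]
      have hstep : pvUpd tsum num (pvRepr tsum acc) = pvRepr tsum (pvMinStep tsum acc num) := by
        cases acc with
        | none => simp [pvRepr, pvMinStep, pvUpd]
        | some m =>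
            simp only [pvRepr, pvMinStep, pvUpd, pvProd_pair]
            by_cases h : (tsum - num) * num < (tsum - m) * m
            · rw [if_pos (Or.inr h), if_pos h]
            · rw [if_neg ?hng, if_neg h]
              case hng =>
                rintro (hc | hc)
                · simp at hc
                · exact h hc
      rw [hstep]; exact ih _
  
lemma pvMin?_eq_fold (tsum : Int) (vs : List Int) :
    PySem.List.min? vs (fun num => (tsum - num) * num) = vs.foldl (pvMinStep tsum) none := by
  have h : pvMinStep tsum = fun (acc : Option Int) (num : Int) =>
      match acc with
      | none => some num
      | some m => if (tsum - num) * num < (tsum - m) * m then some num else some m := by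
    funext acc num; cases acc <;> rfl
  rw [h]
  show vs.foldl _ none = vs.foldl _ none
  congr 1
  funext acc num
  cases acc <;> rfl

-- the candidate values are exactly the filtered index list of B, mapped to their elements
lemma pvCvals_eq_filter (tsum : Int) :
    ∀ (rest pref : List Int),
      pvCvals tsum pref rest =
      ((List.range' pref.length rest.length).filter
          (fun k => ((pref ++ rest).take k).contains (tsum - (pref ++ rest).getD k 0))).map
        (fun k => (pref ++ rest).getD k 0) := by
  intro rest
  induction rest with
  | nil => intro pref; rfl
  | cons num t ih =>
      intro pref
      have hassoc : pref ++ num :: t = (pref ++ [num]) ++ t := by simp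
      have htake : (pref ++ num :: t).take pref.length = pref := by
        exact List.take_left
      have hget : (pref ++ num :: t).getD pref.length 0 = num := by
        rw [List.getD_append_right _ _ _ _ (le_refl _)]
        simp
      rw [List.length_cons, List.range'_succ]
      unfold pvCvals
      rw [List.filter_cons]
      by_cases hm : (tsum - num) ∈ pref
      · have hcond : ((pref ++ num :: t).take pref.length).contains
            (tsum - (pref ++ num :: t).getD pref.length 0) = true := by
          rw [htake, hget]; simpa using hm
        rw [if_pos hm, if_pos hcond, List.map_cons, hget]
        have := ih (pref ++ [num])
        rw [hassoc]
        simpa using this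
      · have hcond : ¬ ((pref ++ num :: t).take pref.length).contains
            (tsum - (pref ++ num :: t).getD pref.length 0) = true := by
          rw [htake, hget]; simpa using hm
        rw [if_neg hm, if_neg hcond, List.nil_append]
        have := ih (pref ++ [num])
        rw [hassoc]
        simpa using this

-- min? of a mapped list
lemma pvMin?_map_aux {a b : Type} (f : a -> b) (key : b -> Int) :
    forall (l : List a) (acc : Option a),
      l.foldl (fun (ac : Option b) k =>
          match ac with
          | none => some (f k)
          | some m => if key (f k) < key m then some (f k) else some m) (acc.map f)
      = (l.foldl (fun (ac : Option a) k =>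
          match ac with
          | none => some k
          | some m => if key (f k) < key (f m) then some k else some m) acc).map f := by
  intro l
  induction l with
  | nil => intro acc; rfl
  | cons x t ih =>
      intro acc
      rw [List.foldl_cons, List.foldl_cons]
      have hstep :
          (match acc.map f with
           | none => some (f x)
           | some m => if key (f x) < key m then some (f x) else some m)
          = (match acc with
             | none => some x
             | some m => if key (f x) < key (f m) then some x else some m).map f := by
        cases acc with
        | none => rfl
        | some m =>
            simp only [Option.map_some]
            split_ifs <;> rfl
      rw [hstep]
      exact ih _

lemma pvMin?_map {a b : Type} (f : a -> b) (key : b -> Int) (l : List a) :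
    PySem.List.min? (l.map f) key = (PySem.List.min? l (fun k => key (f k))).map f := by
  show (l.map f).foldl (fun (ac : Option b) x =>
      match ac with
      | none => some x
      | some m => if key x < key m then some x else some m) none = _
  rw [List.foldl_map]
  exact pvMin?_map_aux f key l none

-- ===== VERDICT (by name: the statement is the Claim_ definition above) =====
theorem FindNumbersWithSum1_spec : Claim_equal_FindNumbersWithSum1 := by
  intro array tsum _
  unfold Spec_FindNumbersWithSum1 FindNumbersWithSum1 FindNumbersWithSum1_alt
  -- A side: fold with the dict = sweep over the seen prefix
  have hA0 : (array.foldl (pvStepA tsum) (PySem.Dict.empty, [])).2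
      = (array.foldl (pvStepS tsum) ([], [])).2 := by
    apply pv_main tsum array [] PySem.Dict.empty []
    exact ⟨fun v hv => by simp [PySem.Dict.contains_empty] at hv, fun v hv => by cases hv⟩
  -- the Nat-indexed candidate list
  set cond : Nat -> Bool :=
    fun k => (array.take k).contains (tsum - array.getD k 0) with hcond
  set fidx : List Nat := (List.range array.length).filter cond with hfidx
  set fval : Nat -> Int := fun k => array.getD k 0 with hfval
  have hcv : pvCvals tsum [] array = fidx.map fval := by
    have := pvCvals_eq_filter tsum array []
    simpa [List.range_eq_range', hfidx, hcond, hfval] using this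
  have hAside : (array.foldl (pvStepA tsum) (PySem.Dict.empty, [])).2
      = pvRepr tsum ((PySem.List.min? fidx
          (fun k => (tsum - fval k) * fval k)).map fval) := by
    rw [hA0, pvSweep_eq_cvals tsum array [] [], hcv]
    have h1 : ([] : List Int) = pvRepr tsum none := rfl
    rw [h1, pvFold_upd_repr tsum (fidx.map fval) none, <- pvMin?_eq_fold tsum (fidx.map fval),
      pvMin?_map fval (fun num => (tsum - num) * num) fidx]
  rw [hAside]
  -- B side: the Int-indexed candidate list is fidx mapped through the Nat cast
  have hrange : PySem.List.pyRange 0 (array.length : Int) 1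
      = (List.range array.length).map (fun k : Nat => (k : Int)) := by
    rw [PySem.List.pyRange_one]
    simp
  have hpred : forall k : Nat,
      ((PySem.List.slice array (some 0) (some ((k : Nat) : Int))).contains
        (tsum - PySem.List.pyGetD array ((k : Nat) : Int) 0)) = cond k := by
    intro k
    rw [PySem.List.slice_zero_start, PySem.List.slice_to_natCast, PySem.List.pyGetD_natCast]
  have hcands : (PySem.List.pyRange 0 (array.length : Int) 1).filter
      (fun j => (PySem.List.slice array (some 0) (some j)).contains
        (tsum - PySem.List.pyGetD array j 0))
      = fidx.map (fun k : Nat => (k : Int)) := by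
    rw [hrange, List.filter_map]
    congr 1
    apply List.filter_congr
    intro k _
    exact hpred k
  rw [hcands]
  have hkey : forall k : Nat,
      ((tsum - PySem.List.pyGetD array ((k : Nat) : Int) 0) * PySem.List.pyGetD array ((k : Nat) : Int) 0)
      = (tsum - fval k) * fval k := by
    intro k; rw [PySem.List.pyGetD_natCast]
  -- case on the minimum over fidx
  rcases hmin : PySem.List.min? fidx (fun k => (tsum - fval k) * fval k) with _ | j
  · -- no candidate
    have hnil : fidx = [] := (PySem.List.min?_eq_none_iff _ _).mp hmin
    simp [hnil, pvRepr]
  · -- some candidate j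
    have hne : fidx.map (fun k : Nat => (k : Int)) ≠ [] := by
      intro h
      have : fidx = [] := by simpa using h
      rw [(PySem.List.min?_eq_none_iff fidx _).mpr this] at hmin
      cases hmin
    rw [if_neg hne]
    have hminmap : PySem.List.min? (fidx.map (fun k : Nat => (k : Int)))
        (fun j => (tsum - PySem.List.pyGetD array j 0) * PySem.List.pyGetD array j 0)
        = some ((j : Int)) := by
      rw [pvMin?_map (fun k : Nat => (k : Int))
        (fun j => (tsum - PySem.List.pyGetD array j 0) * PySem.List.pyGetD array j 0) fidx]
      have : PySem.List.min? fidx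
          (fun k => (tsum - PySem.List.pyGetD array ((k : Nat) : Int) 0) * PySem.List.pyGetD array ((k : Nat) : Int) 0)
          = some j := by
        rw [show (fun k : Nat => (tsum - PySem.List.pyGetD array ((k : Nat) : Int) 0) * PySem.List.pyGetD array ((k : Nat) : Int) 0)
            = (fun k : Nat => (tsum - fval k) * fval k) from funext hkey]
        exact hmin
      rw [this, Option.map_some]
    rw [hminmap]
    simp only [pvRepr, Option.map_some]
    rw [PySem.List.pyGetD_natCast]
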